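-- pv_equiv track=rewrite | github.com/KMORaza/leetcode-solutions | LeetCode Solutions/1765.py | highestPeak
-- ===== SOURCE A (Python) =====
-- from typing import List
-- from collections import deque
--
-- def highestPeak(isWater: List[List[int]]) -> List[List[int]]:
--     rows, cols = len(isWater), len(isWater[0])
--     heights = [[-1] * cols for _ in range(rows)]
--     queue = deque()
--     for r in range(rows):
--         for c in range(cols):
--             if isWater[r][c] == 1:
--                 heights[r][c] = 0
--                 queue.append((r, c))
--     directions = [(1, 0), (-1, 0), (0, 1), (0, -1)]
--     while queue:
--         r, c = queue.popleft()
--         for dr, dc in directions: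
--             nr, nc = r + dr, c + dc
--             if 0 <= nr < rows and 0 <= nc < cols and heights[nr][nc] == -1:
--                 heights[nr][nc] = heights[r][c] + 1
--                 queue.append((nr, nc))
--     return heights
-- ===== SOURCE B (Python) =====
-- def highestPeak(isWater):
--     rows, cols = len(isWater), len(isWater[0])
--     water = [(r, c) for r in range(rows) for c in range(cols) if isWater[r][c] == 1]
--     if not water:
--         return [[-1] * cols for _ in range(rows)]
--     return [[min(abs(r - wr) + abs(c - wc) for wr, wc in water)
--              for c in range(cols)] for r in range(rows)]
-- ===== Notes on version B (the rewrite author's own statement) =====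
-- stated objective: alternative
-- what changed: Replaces the FIFO-queue breadth-first flood (mutating a heights grid and enqueueing neighbours) by a direct closed-form computation: collect the water cells once, then build the result grid cell by cell as the minimum Manhattan distance to any water cell (-1 everywhere when there is no water), which equals BFS distance because the grid is unobstructed.
-- outside the precondition, e.g. on highestPeak([]): A raises IndexError, B raises IndexError
import Mathlib
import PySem

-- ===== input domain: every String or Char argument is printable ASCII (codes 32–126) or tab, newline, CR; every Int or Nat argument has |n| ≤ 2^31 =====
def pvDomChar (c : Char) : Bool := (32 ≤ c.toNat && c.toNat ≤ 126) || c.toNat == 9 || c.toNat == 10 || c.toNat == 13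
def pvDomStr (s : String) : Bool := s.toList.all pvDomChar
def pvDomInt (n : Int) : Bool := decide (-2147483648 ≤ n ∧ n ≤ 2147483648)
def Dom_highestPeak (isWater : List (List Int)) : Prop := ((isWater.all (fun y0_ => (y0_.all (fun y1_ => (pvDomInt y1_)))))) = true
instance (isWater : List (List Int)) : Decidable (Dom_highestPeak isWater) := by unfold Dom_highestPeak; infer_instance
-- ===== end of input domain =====

-- B replaces A's FIFO-queue breadth-first flood over a mutable grid by a closed-form
-- computation: collect the water cells once and fill each cell with its minimum
-- Manhattan distance to a water cell (-1 everywhere when there is no water);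
-- equal return values are proved (neither mutates its argument).

-- ===== PORT A =====
-- grid read/write; every call site first checks 0 ≤ index < bound, so .toNat agrees with
-- Python indexing there and the -2 default is never exposed
def hget (h : List (List Int)) (r c : Int) : Int := (h.getD r.toNat []).getD c.toNat (-2)

def hset (h : List (List Int)) (r c : Int) (v : Int) : List (List Int) :=
  h.set r.toNat ((h.getD r.toNat []).set c.toNat v)

-- number of still-unassigned (-1) cells; only used to size the loop's termination fuel
def mc (h : List (List Int)) : Nat := (h.map (fun row => row.countP (fun v => v == -1))).sum

-- isWater[r][c] (in range at every admitted use)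
def wat (iw : List (List Int)) (r c : Nat) : Int := (iw.getD r []).getD c 0

-- A's innermost conditional:
-- "if 0 <= nr < rows and 0 <= nc < cols and heights[nr][nc] == -1: fill and append"
def pvStep (rows cols : Nat) (val : List (List Int) → Int)
    (st : List (List Int) × List (Int × Int)) (nr nc : Int) :
    List (List Int) × List (Int × Int) :=
  if 0 ≤ nr ∧ nr < (rows : Int) ∧ 0 ≤ nc ∧ nc < (cols : Int) ∧ hget st.1 nr nc = -1 then
    (hset st.1 nr nc (val st.1), st.2 ++ [(nr, nc)])
  else st

-- A: for dr, dc in directions: heights[nr][nc] = heights[r][c] + 1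
def expandA (rows cols : Nat) (st : List (List Int) × List (Int × Int)) (p : Int × Int) :
    List (List Int) × List (Int × Int) :=
  [((1 : Int), (0 : Int)), (-1, 0), (0, 1), (0, -1)].foldl
    (fun st d => pvStep rows cols (fun h => hget h p.1 p.2 + 1) st (p.1 + d.1) (p.2 + d.2)) st

-- A's 'while queue': popleft then expand; the fuel 2*mc+|queue|+1 dominates the loop's
-- strictly decreasing measure, so it is never exhausted (totality device only)
def goA (rows cols : Nat) : Nat → List (List Int) → List (Int × Int) → List (List Int)
  | 0, h, _ => h
  | _ + 1, h, [] => h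
  | fuel + 1, h, p :: q =>
    let st := expandA rows cols (h, q) p
    goA rows cols fuel st.1 st.2

-- heights := rows × cols grid of -1; double loop marking water cells 0 and enqueueing them
def initA (iw : List (List Int)) (rows cols : Nat) :
    List (List Int) × List (Int × Int) :=
  (List.range rows).foldl (fun st r =>
      (List.range cols).foldl (fun st c =>
          if wat iw r c = 1 then (hset st.1 (r : Int) (c : Int) 0, st.2 ++ [((r : Int), (c : Int))])
          else st) st)
    (List.replicate rows (List.replicate cols (-1)), [])

def highestPeak (isWater : List (List Int)) : List (List Int) :=
  match isWater with
  | [] => []      -- Python raises IndexError on len(isWater[0]); excluded by Pre_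
  | row0 :: _ =>
    let rows := isWater.length
    let cols := row0.length
    let st := initA isWater rows cols
    goA rows cols (2 * mc st.1 + st.2.length + 1) st.1 st.2

-- ===== PORT B =====
-- abs(r - wr) + abs(c - wc)
def mdist (x w : Int × Int) : Int := ((x.1 - w.1).natAbs : Int) + ((x.2 - w.2).natAbs : Int)

def highestPeak_alt (isWater : List (List Int)) : List (List Int) :=
  match isWater with
  | [] => []      -- Python raises IndexError on len(isWater[0]); excluded by Pre_
  | row0 :: _ =>
    let rows := isWater.length
    let cols := row0.length
    -- water = [(r, c) for r in range(rows) for c in range(cols) if isWater[r][c] == 1]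
    let water := (List.range rows).flatMap (fun r =>
        (List.range cols).filterMap (fun c =>
          if wat isWater r c = 1 then some ((r : Int), (c : Int)) else none))
    match water with
    | [] => List.replicate rows (List.replicate cols (-1))   -- [[-1] * cols for _ in range(rows)]
    | w0 :: ws =>
      -- min over the nonempty water list of the Manhattan distance, per cell
      (List.range rows).map (fun r : Nat => (List.range cols).map (fun c : Nat =>
        (ws.map (fun w => mdist ((r : Int), (c : Int)) w)).foldl min
          (mdist ((r : Int), (c : Int)) w0)))

-- ===== PRECONDITION & SPEC =====
-- exactly the inputs where Python A returns: a nonempty outer list (len(isWater[0]) raises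
-- IndexError on []) whose rows all have at least len(isWater[0]) entries (shorter rows make
-- isWater[r][c] raise IndexError for some c < cols)
def Pre_highestPeak (isWater : List (List Int)) : Prop :=
  isWater ≠ [] ∧ ∀ row ∈ isWater, (isWater.headD []).length ≤ row.length
instance (isWater : List (List Int)) : Decidable (Pre_highestPeak isWater) := by
  unfold Pre_highestPeak; infer_instance

def pvWitness_highestPeak : List (List Int) := [[1, 0], [0, 0]]

def Spec_highestPeak (isWater : List (List Int)) (out : List (List Int)) : Prop := out = highestPeak_alt isWater
instance (isWater : List (List Int)) (out : List (List Int)) : Decidable (Spec_highestPeak isWater out) := by unfold Spec_highestPeak; infer_instance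

-- ===== CLAIM (what is proved, stated in full; the proofs are below) =====
def Claim_equal_highestPeak : Prop := ∀ (isWater : List (List Int)), Dom_highestPeak isWater → Pre_highestPeak isWater → Spec_highestPeak isWater (highestPeak isWater)

-- ===== LEMMAS AND PROOFS =====

-- proof-side intermediate program: a level-synchronous BFS used as a bridge between
-- A's queue BFS and B's closed-form distance grid
def expandB (rows cols : Nat) (lvl : Int) (st : List (List Int) × List (Int × Int))
    (p : Int × Int) : List (List Int) × List (Int × Int) :=
  [(p.1 + 1, p.2), (p.1 - 1, p.2), (p.1, p.2 + 1), (p.1, p.2 - 1)].foldl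
    (fun st n => pvStep rows cols (fun _ => lvl) st n.1 n.2) st

def goB (rows cols : Nat) : Nat → List (List Int) → List (Int × Int) → Int → List (List Int)
  | 0, h, _, _ => h
  | _ + 1, h, [], _ => h
  | fuel + 1, h, p :: f, lvl =>
    let st := (p :: f).foldl (expandB rows cols (lvl + 1)) (h, [])
    goB rows cols fuel st.1 st.2 (lvl + 1)

-- shapes, invariants, and the loops run at their canonical fuel
def Shape (rows cols : Nat) (h : List (List Int)) : Prop :=
  h.length = rows ∧ ∀ row ∈ h, row.length = cols

def InvG (rows cols : Nat) (h : List (List Int)) : Prop :=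
  Shape rows cols h ∧ ∀ row ∈ h, ∀ v ∈ row, -1 ≤ v

def InQ (rows cols : Nat) (p : Int × Int) : Prop :=
  0 ≤ p.1 ∧ p.1 < (rows : Int) ∧ 0 ≤ p.2 ∧ p.2 < (cols : Int)

def runA (rows cols : Nat) (h : List (List Int)) (q : List (Int × Int)) : List (List Int) :=
  goA rows cols (2 * mc h + q.length + 1) h q

def runB (rows cols : Nat) (h : List (List Int)) (f : List (Int × Int)) (lvl : Int) :
    List (List Int) :=
  goB rows cols (mc h + f.length + 1) h f lvl

def stepFold (rows cols : Nat) (val : List (List Int) → Int)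
    (st : List (List Int) × List (Int × Int)) (l : List (Int × Int)) :
    List (List Int) × List (Int × Int) :=
  l.foldl (fun st n => pvStep rows cols val st n.1 n.2) st

def nbrs (p : Int × Int) : List (Int × Int) :=
  [(p.1 + 1, p.2), (p.1 - 1, p.2), (p.1, p.2 + 1), (p.1, p.2 - 1)]

-- minimum Manhattan distance to the (nonempty) water list, exactly as B computes it
def Dmin (w0 : Int × Int) (ws : List (Int × Int)) (x : Int × Int) : Int :=
  (ws.map (fun w => mdist x w)).foldl min (mdist x w0)

-- ---- list helpers used by the counting argument ----
theorem pv_sum_set (l : List Nat) (i : Nat) (x : Nat) (h : i < l.length) :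
    (l.set i x).sum + l.getD i 0 = l.sum + x := by
  induction l generalizing i with
  | nil => simp at h
  | cons a t ih =>
    cases i with
    | zero => simp [List.sum_cons]; omega
    | succ n =>
      simp only [List.set_cons_succ, List.sum_cons, List.getD_cons_succ]
      have hn : n < t.length := by simpa using h
      have := ih n hn
      omega

theorem pv_countP_set (l : List Int) (i : Nat) (x : Int) (p : Int → Bool) (h : i < l.length) :
    (l.set i x).countP p + (if p (l.getD i 0) then 1 else 0)
      = l.countP p + (if p x then 1 else 0) := by
  induction l generalizing i with
  | nil => simp at h
  | cons a t ih =>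
    cases i with
    | zero => simp [List.countP_cons]; split_ifs <;> omega
    | succ n =>
      simp only [List.set_cons_succ, List.countP_cons, List.getD_cons_succ]
      have hn : n < t.length := by simpa using h
      have := ih n hn
      split_ifs at * <;> omega

-- ---- grid cell lemmas ----
theorem hget_hset_self (h : List (List Int)) (r c : Int) (v : Int)
    (hr : r.toNat < h.length) (hc : c.toNat < (h.getD r.toNat []).length) :
    hget (hset h r c v) r c = v := by
  unfold hget hset
  have hc' : c.toNat < h[r.toNat].length := by
    rw [List.getD_eq_getElem _ _ hr] at hc; exact hc
  simp [List.getD, List.getElem?_set, hr, hc']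

theorem hget_hset_ne (h : List (List Int)) (a b r c : Int) (v : Int)
    (hne : a.toNat ≠ r.toNat ∨ b.toNat ≠ c.toNat) :
    hget (hset h a b v) r c = hget h r c := by
  unfold hget hset
  by_cases har : a.toNat = r.toNat
  · have hbc : b.toNat ≠ c.toNat := by tauto
    rw [har]
    by_cases hin : r.toNat < h.length
    · have h1 : (h.set r.toNat ((h.getD r.toNat []).set b.toNat v)).getD r.toNat []
          = (h.getD r.toNat []).set b.toNat v := by
        simp [List.getD, List.getElem?_set, hin]
      rw [h1]
      simp [List.getD, List.getElem?_set, hbc]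
    · have hle : h.length ≤ r.toNat := by omega
      rw [List.set_eq_of_length_le hle]
  · simp [List.getD, List.getElem?_set, har]

theorem shape_hset (rows cols : Nat) (h : List (List Int)) (a b : Int) (v : Int)
    (hs : Shape rows cols h) : Shape rows cols (hset h a b v) := by
  obtain ⟨hlen, hrow⟩ := hs
  unfold hset
  by_cases hin : a.toNat < h.length
  · constructor
    · simpa using hlen
    · intro row hmem
      rcases List.mem_or_eq_of_mem_set hmem with hmem' | rfl
      · exact hrow _ hmem'
      · have hm : (h.getD a.toNat []) ∈ h := by
          rw [List.getD_eq_getElem _ _ hin]; exact List.getElem_mem hin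
        simpa using hrow _ hm
  · have hle : h.length ≤ a.toNat := by omega
    rw [List.set_eq_of_length_le hle]
    exact ⟨hlen, hrow⟩

theorem invG_hset (rows cols : Nat) (h : List (List Int)) (a b : Int) (v : Int)
    (hs : InvG rows cols h) (hv : -1 ≤ v) : InvG rows cols (hset h a b v) := by
  obtain ⟨hs', hval⟩ := hs
  refine ⟨shape_hset rows cols h a b v hs', ?_⟩
  intro row hmem x hx
  rcases List.mem_or_eq_of_mem_set hmem with hmem' | rfl
  · exact hval _ hmem' _ hx
  · rcases List.mem_or_eq_of_mem_set hx with hx' | rfl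
    · by_cases hin : a.toNat < h.length
      · have : (h.getD a.toNat []) ∈ h := by
          rw [List.getD_eq_getElem _ _ hin]; exact List.getElem_mem hin
        exact hval _ this _ hx'
      · have : h.getD a.toNat [] = [] := by rw [List.getD_eq_default]; omega
        rw [this] at hx'; simp at hx'
    · exact hv

theorem hget_ge (rows cols : Nat) (h : List (List Int)) (r c : Int)
    (hs : InvG rows cols h) (hp : InQ rows cols (r, c)) : -1 ≤ hget h r c := by
  obtain ⟨⟨hlen, hrow⟩, hval⟩ := hs
  obtain ⟨h1, h2, h3, h4⟩ := hp
  simp only at h1 h2 h3 h4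
  have hr : r.toNat < h.length := by omega
  have hmem : (h.getD r.toNat []) ∈ h := by
    rw [List.getD_eq_getElem _ _ hr]; exact List.getElem_mem hr
  have hc : c.toNat < (h.getD r.toNat []).length := by
    rw [hrow _ hmem]; omega
  unfold hget
  rw [List.getD_eq_getElem _ _ hc]
  exact hval _ hmem _ (List.getElem_mem hc)

theorem mc_hset (h : List (List Int)) (r c : Int) (v : Int)
    (hr : r.toNat < h.length) (hc : c.toNat < (h.getD r.toNat []).length)
    (hold : hget h r c = -1) (hv : v ≠ -1) :
    mc (hset h r c v) + 1 = mc h := by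
  unfold mc hset
  rw [List.map_set]
  have hlen : r.toNat < (h.map (fun row => row.countP (fun v => v == -1))).length := by
    simpa using hr
  have hsum := pv_sum_set (h.map (fun row => row.countP (fun v => v == -1))) r.toNat
    (((h.getD r.toNat []).set c.toNat v).countP (fun v => v == -1)) hlen
  have hgetd : (h.map (fun row => row.countP (fun v => v == -1))).getD r.toNat 0
      = (h.getD r.toNat []).countP (fun v => v == -1) := by
    rw [List.getD_eq_getElem _ _ hlen, List.getElem_map, List.getD_eq_getElem _ _ hr]
  rw [hgetd] at hsum
  have hcp := pv_countP_set (h.getD r.toNat []) c.toNat v (fun v => v == -1) hc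
  have hcell : (h.getD r.toNat []).getD c.toNat 0 = -1 := by
    unfold hget at hold
    rw [List.getD_eq_getElem _ _ hc] at hold ⊢
    exact hold
  rw [hcell] at hcp
  simp only [hv, beq_iff_eq, if_true, if_false, reduceIte] at hcp
  omega

-- ---- single pvStep lemmas ----
theorem pvStep_loc (rows cols : Nat) (val : List (List Int) → Int)
    (h : List (List Int)) (q : List (Int × Int)) (nr nc : Int) :
    pvStep rows cols val (h, q) nr nc =
      ((pvStep rows cols val (h, []) nr nc).1, q ++ (pvStep rows cols val (h, []) nr nc).2) := by
  unfold pvStep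
  split <;> simp

theorem pvStep_congr (rows cols : Nat) (val₁ val₂ : List (List Int) → Int)
    (st : List (List Int) × List (Int × Int)) (nr nc : Int)
    (hv : val₁ st.1 = val₂ st.1) :
    pvStep rows cols val₁ st nr nc = pvStep rows cols val₂ st nr nc := by
  unfold pvStep
  rw [hv]

theorem pvStep_preserve (rows cols : Nat) (val : List (List Int) → Int)
    (st : List (List Int) × List (Int × Int)) (nr nc a b : Int)
    (hab : hget st.1 a b ≠ -1) :
    hget (pvStep rows cols val st nr nc).1 a b = hget st.1 a b := by
  unfold pvStep
  split
  · next hcond =>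
    obtain ⟨_, _, _, _, hm1⟩ := hcond
    by_cases heq : nr.toNat = a.toNat ∧ nc.toNat = b.toNat
    · exfalso
      apply hab
      unfold hget at hm1 ⊢
      rw [← heq.1, ← heq.2]
      exact hm1
    · exact hget_hset_ne st.1 nr nc a b _ (by tauto)
  · rfl

theorem pvStep_bundle (rows cols : Nat) (val : List (List Int) → Int)
    (st : List (List Int) × List (Int × Int)) (nr nc : Int)
    (hInv : InvG rows cols st.1) (hval : 0 ≤ val st.1) :
    InvG rows cols (pvStep rows cols val st nr nc).1 ∧
    mc (pvStep rows cols val st nr nc).1 + (pvStep rows cols val st nr nc).2.length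
      = mc st.1 + st.2.length ∧
    mc (pvStep rows cols val st nr nc).1 ≤ mc st.1 ∧
    (∀ x ∈ (pvStep rows cols val st nr nc).2, x ∈ st.2 ∨ InQ rows cols x) := by
  unfold pvStep
  split
  · next hcond =>
    obtain ⟨h1, h2, h3, h4, hm1⟩ := hcond
    have hr : nr.toNat < st.1.length := by
      obtain ⟨⟨hlen, _⟩, _⟩ := hInv; omega
    have hc : nc.toNat < (st.1.getD nr.toNat []).length := by
      obtain ⟨⟨hlen, hrow⟩, _⟩ := hInv
      have hmem : (st.1.getD nr.toNat []) ∈ st.1 := by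
        rw [List.getD_eq_getElem _ _ hr]; exact List.getElem_mem hr
      rw [hrow _ hmem]; omega
    have hmc := mc_hset st.1 nr nc (val st.1) hr hc hm1 (by omega)
    refine ⟨invG_hset rows cols st.1 nr nc _ hInv (by omega), ?_,
      (by show mc (hset st.1 nr nc (val st.1)) ≤ mc st.1; omega), ?_⟩
    · simp only [List.length_append, List.length_cons, List.length_nil]
      omega
    · intro x hx
      rcases List.mem_append.mp hx with hx' | hx'
      · exact Or.inl hx'
      · simp at hx'
        subst hx'
        exact Or.inr ⟨h1, h2, h3, h4⟩
  · exact ⟨hInv, rfl, le_refl _, fun x hx => Or.inl hx⟩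

theorem pvStep_const_new (rows cols : Nat) (v : Int)
    (st : List (List Int) × List (Int × Int)) (nr nc : Int)
    (hInv : InvG rows cols st.1) :
    ∀ x ∈ (pvStep rows cols (fun _ => v) st nr nc).2,
      x ∈ st.2 ∨ hget (pvStep rows cols (fun _ => v) st nr nc).1 x.1 x.2 = v := by
  unfold pvStep
  split
  · next hcond =>
    obtain ⟨h1, h2, h3, h4, hm1⟩ := hcond
    intro x hx
    rcases List.mem_append.mp hx with hx' | hx'
    · exact Or.inl hx'
    · simp at hx'
      subst hx'
      refine Or.inr ?_
      have hr : nr.toNat < st.1.length := by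
        obtain ⟨⟨hlen, _⟩, _⟩ := hInv; omega
      have hc : nc.toNat < (st.1.getD nr.toNat []).length := by
        obtain ⟨⟨hlen, hrow⟩, _⟩ := hInv
        have hmem : (st.1.getD nr.toNat []) ∈ st.1 := by
          rw [List.getD_eq_getElem _ _ hr]; exact List.getElem_mem hr
        rw [hrow _ hmem]; omega
      exact hget_hset_self st.1 nr nc v hr hc
  · intro x hx
    exact Or.inl hx

-- ---- stepFold lemmas (induction over the neighbour list) ----
theorem stepFold_cons (rows cols : Nat) (val : List (List Int) → Int)
    (st : List (List Int) × List (Int × Int)) (n : Int × Int) (l : List (Int × Int)) :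
    stepFold rows cols val st (n :: l)
      = stepFold rows cols val (pvStep rows cols val st n.1 n.2) l := rfl

theorem stepFold_loc (rows cols : Nat) (val : List (List Int) → Int)
    (l : List (Int × Int)) : ∀ (h : List (List Int)) (q : List (Int × Int)),
    stepFold rows cols val (h, q) l =
      ((stepFold rows cols val (h, []) l).1, q ++ (stepFold rows cols val (h, []) l).2) := by
  induction l with
  | nil => intro h q; simp [stepFold]
  | cons n l ih =>
    intro h q
    rcases hP : pvStep rows cols val (h, []) n.1 n.2 with ⟨P1, P2⟩
    have hQ : pvStep rows cols val (h, q) n.1 n.2 = (P1, q ++ P2) := by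
      rw [pvStep_loc, hP]
    simp only [stepFold, List.foldl_cons] at *
    rw [hQ, hP, ih P1 (q ++ P2), ih P1 P2]
    simp

theorem stepFold_preserve (rows cols : Nat) (val : List (List Int) → Int)
    (l : List (Int × Int)) : ∀ (st : List (List Int) × List (Int × Int)) (a b : Int),
    hget st.1 a b ≠ -1 → hget (stepFold rows cols val st l).1 a b = hget st.1 a b := by
  induction l with
  | nil => intro st a b _; rfl
  | cons n l ih =>
    intro st a b hab
    have h1 := pvStep_preserve rows cols val st n.1 n.2 a b hab
    simp only [stepFold, List.foldl_cons] at *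
    rw [ih _ a b (by rw [h1]; exact hab), h1]

theorem stepFold_bundle (rows cols : Nat) (val : List (List Int) → Int)
    (hval : ∀ h', InvG rows cols h' → 0 ≤ val h')
    (l : List (Int × Int)) : ∀ (st : List (List Int) × List (Int × Int)),
    InvG rows cols st.1 →
    InvG rows cols (stepFold rows cols val st l).1 ∧
    mc (stepFold rows cols val st l).1 + (stepFold rows cols val st l).2.length
      = mc st.1 + st.2.length ∧
    mc (stepFold rows cols val st l).1 ≤ mc st.1 ∧
    (∀ x ∈ (stepFold rows cols val st l).2, x ∈ st.2 ∨ InQ rows cols x) := by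
  induction l with
  | nil => intro st hInv; exact ⟨hInv, rfl, le_refl _, fun x hx => Or.inl hx⟩
  | cons n l ih =>
    intro st hInv
    obtain ⟨hI, hE, hLe, hM⟩ := pvStep_bundle rows cols val st n.1 n.2 hInv (hval _ hInv)
    obtain ⟨hI2, hE2, hLe2, hM2⟩ := ih _ hI
    simp only [stepFold, List.foldl_cons] at *
    refine ⟨hI2, by omega, by omega, ?_⟩
    intro x hx
    rcases hM2 x hx with hx' | hx'
    · rcases hM x hx' with hx'' | hx''
      · exact Or.inl hx''
      · exact Or.inr hx''
    · exact Or.inr hx'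

theorem stepFold_const_new (rows cols : Nat) (v : Int) (hv : 0 ≤ v)
    (l : List (Int × Int)) : ∀ (st : List (List Int) × List (Int × Int)),
    InvG rows cols st.1 →
    ∀ x ∈ (stepFold rows cols (fun _ => v) st l).2,
      x ∈ st.2 ∨ hget (stepFold rows cols (fun _ => v) st l).1 x.1 x.2 = v := by
  induction l with
  | nil => intro st _ x hx; exact Or.inl hx
  | cons n l ih =>
    intro st hInv x
    rw [stepFold_cons]
    intro hx
    obtain ⟨hI, _, _, _⟩ := pvStep_bundle rows cols (fun _ => v) st n.1 n.2 hInv hv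
    rcases ih _ hI x hx with hx' | hx'
    · rcases pvStep_const_new rows cols v st n.1 n.2 hInv x hx' with hx'' | hx''
      · exact Or.inl hx''
      · refine Or.inr ?_
        rw [stepFold_preserve rows cols _ l _ x.1 x.2 (by rw [hx'']; omega)]
        exact hx''
    · exact Or.inr hx'

-- ---- the two expand bodies as stepFolds over the same neighbour list ----
theorem expandA_eq_stepFold (rows cols : Nat) (st : List (List Int) × List (Int × Int))
    (p : Int × Int) :
    expandA rows cols st p = stepFold rows cols (fun h => hget h p.1 p.2 + 1) st (nbrs p) := by
  simp [expandA, stepFold, nbrs, sub_eq_add_neg]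

theorem expandB_eq_stepFold (rows cols : Nat) (lvl : Int)
    (st : List (List Int) × List (Int × Int)) (p : Int × Int) :
    expandB rows cols lvl st p = stepFold rows cols (fun _ => lvl) st (nbrs p) := by
  rfl

theorem stepFold_congr (rows cols : Nat) (p : Int × Int) (lvl : Int) (hlvl : 0 ≤ lvl)
    (l : List (Int × Int)) : ∀ (st : List (List Int) × List (Int × Int)),
    InvG rows cols st.1 → hget st.1 p.1 p.2 = lvl →
    stepFold rows cols (fun h => hget h p.1 p.2 + 1) st l
      = stepFold rows cols (fun _ => lvl + 1) st l := by
  induction l with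
  | nil => intro st _ _; rfl
  | cons n l ih =>
    intro st hInv hp
    have hstep : pvStep rows cols (fun h => hget h p.1 p.2 + 1) st n.1 n.2
        = pvStep rows cols (fun _ => lvl + 1) st n.1 n.2 :=
      pvStep_congr rows cols _ _ st n.1 n.2 (by rw [hp])
    obtain ⟨hI, _, _, _⟩ := pvStep_bundle rows cols (fun _ => lvl + 1) st n.1 n.2 hInv
      (by show (0:Int) ≤ lvl + 1; omega)
    have hp2 : hget (pvStep rows cols (fun _ => lvl + 1) st n.1 n.2).1 p.1 p.2 = lvl := by
      rw [pvStep_preserve rows cols _ st n.1 n.2 p.1 p.2 (by rw [hp]; omega)]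
      exact hp
    simp only [stepFold, List.foldl_cons] at *
    rw [hstep, ih _ hI hp2]

theorem expandA_eq_expandB (rows cols : Nat) (st : List (List Int) × List (Int × Int))
    (p : Int × Int) (lvl : Int) (hlvl : 0 ≤ lvl)
    (hInv : InvG rows cols st.1) (hp : hget st.1 p.1 p.2 = lvl) :
    expandA rows cols st p = expandB rows cols (lvl + 1) st p := by
  rw [expandA_eq_stepFold, expandB_eq_stepFold]
  exact stepFold_congr rows cols p lvl hlvl _ st hInv hp

-- ---- per-cell bundles ----
theorem percellA (rows cols : Nat) (st : List (List Int) × List (Int × Int)) (p : Int × Int)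
    (hInv : InvG rows cols st.1) (hp : InQ rows cols p) :
    InvG rows cols (expandA rows cols st p).1 ∧
    mc (expandA rows cols st p).1 + (expandA rows cols st p).2.length
      = mc st.1 + st.2.length ∧
    mc (expandA rows cols st p).1 ≤ mc st.1 ∧
    (∀ x ∈ (expandA rows cols st p).2, x ∈ st.2 ∨ InQ rows cols x) := by
  rw [expandA_eq_stepFold]
  refine stepFold_bundle rows cols _ ?_ _ st hInv
  intro h' hI
  have := hget_ge rows cols h' p.1 p.2 hI (by exact hp)
  omega

theorem percellB (rows cols : Nat) (st : List (List Int) × List (Int × Int)) (p : Int × Int)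
    (lvl : Int) (hlvl : 0 ≤ lvl) (hInv : InvG rows cols st.1) :
    InvG rows cols (expandB rows cols (lvl + 1) st p).1 ∧
    mc (expandB rows cols (lvl + 1) st p).1 + (expandB rows cols (lvl + 1) st p).2.length
      = mc st.1 + st.2.length ∧
    mc (expandB rows cols (lvl + 1) st p).1 ≤ mc st.1 ∧
    (∀ x ∈ (expandB rows cols (lvl + 1) st p).2, x ∈ st.2 ∨ InQ rows cols x) ∧
    (∀ x ∈ (expandB rows cols (lvl + 1) st p).2,
      x ∈ st.2 ∨ hget (expandB rows cols (lvl + 1) st p).1 x.1 x.2 = lvl + 1) ∧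
    (∀ a b : Int, hget st.1 a b ≠ -1 →
      hget (expandB rows cols (lvl + 1) st p).1 a b = hget st.1 a b) := by
  rw [expandB_eq_stepFold]
  obtain ⟨hI, hE, hLe, hM⟩ :=
    stepFold_bundle rows cols (fun _ => lvl + 1)
      (fun _ _ => by show (0:Int) ≤ lvl + 1; omega) _ st hInv
  exact ⟨hI, hE, hLe, hM, stepFold_const_new rows cols (lvl + 1) (by omega) _ st hInv,
    fun a b hab => stepFold_preserve rows cols _ _ st a b hab⟩

-- ---- frontier-level folds ----
theorem foldLoc (g : List (List Int) × List (Int × Int) → Int × Int → List (List Int) × List (Int × Int))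
    (hg : ∀ h q p, g (h, q) p = ((g (h, []) p).1, q ++ (g (h, []) p).2)) :
    ∀ (f : List (Int × Int)) (h : List (List Int)) (q : List (Int × Int)),
    f.foldl g (h, q) = ((f.foldl g (h, [])).1, q ++ (f.foldl g (h, [])).2) := by
  intro f
  induction f with
  | nil => intro h q; simp
  | cons p f ih =>
    intro h q
    rcases hP : g (h, []) p with ⟨P1, P2⟩
    have hQ : g (h, q) p = (P1, q ++ P2) := by rw [hg, hP]
    simp only [List.foldl_cons]
    rw [hQ, hP, ih P1 (q ++ P2), ih P1 P2]
    simp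

theorem expandA_loc (rows cols : Nat) (h : List (List Int)) (q : List (Int × Int))
    (p : Int × Int) :
    expandA rows cols (h, q) p
      = ((expandA rows cols (h, []) p).1, q ++ (expandA rows cols (h, []) p).2) := by
  rw [expandA_eq_stepFold, expandA_eq_stepFold, stepFold_loc]

theorem levelEq (rows cols : Nat) (lvl : Int) (hlvl : 0 ≤ lvl) (f : List (Int × Int)) :
    ∀ (h : List (List Int)) (acc : List (Int × Int)),
    InvG rows cols h → (∀ p ∈ f, hget h p.1 p.2 = lvl) →
    f.foldl (expandA rows cols) (h, acc) = f.foldl (expandB rows cols (lvl + 1)) (h, acc) := by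
  induction f with
  | nil => intro h acc _ _; rfl
  | cons p f ih =>
    intro h acc hInv hf
    have hhead : expandA rows cols (h, acc) p = expandB rows cols (lvl + 1) (h, acc) p :=
      expandA_eq_expandB rows cols (h, acc) p lvl hlvl hInv (hf p (by simp))
    rcases hE : expandB rows cols (lvl + 1) (h, acc) p with ⟨E1, E2⟩
    obtain ⟨hI, _, _, _, _, hPres⟩ := percellB rows cols (h, acc) p lvl hlvl hInv
    rw [hE] at hI hPres
    simp only [List.foldl_cons]
    rw [hhead, hE, ih E1 E2 hI]
    intro x hx
    rw [hPres x.1 x.2 (by rw [hf x (by simp [hx])]; omega)]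
    exact hf x (by simp [hx])

theorem levelB (rows cols : Nat) (lvl : Int) (hlvl : 0 ≤ lvl) (f : List (Int × Int)) :
    ∀ (st : List (List Int) × List (Int × Int)), InvG rows cols st.1 →
    InvG rows cols (f.foldl (expandB rows cols (lvl + 1)) st).1 ∧
    mc (f.foldl (expandB rows cols (lvl + 1)) st).1
        + (f.foldl (expandB rows cols (lvl + 1)) st).2.length
      = mc st.1 + st.2.length ∧
    mc (f.foldl (expandB rows cols (lvl + 1)) st).1 ≤ mc st.1 ∧
    (∀ x ∈ (f.foldl (expandB rows cols (lvl + 1)) st).2, x ∈ st.2 ∨ InQ rows cols x) ∧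
    (∀ x ∈ (f.foldl (expandB rows cols (lvl + 1)) st).2,
      x ∈ st.2 ∨ hget (f.foldl (expandB rows cols (lvl + 1)) st).1 x.1 x.2 = lvl + 1) ∧
    (∀ a b : Int, hget st.1 a b ≠ -1 →
      hget (f.foldl (expandB rows cols (lvl + 1)) st).1 a b = hget st.1 a b) := by
  induction f with
  | nil =>
    intro st hInv
    exact ⟨hInv, rfl, le_refl _, fun x hx => Or.inl hx, fun x hx => Or.inl hx,
      fun a b _ => rfl⟩
  | cons p f ih =>
    intro st hInv
    obtain ⟨hI, hE, hLe, hM, hN, hP⟩ := percellB rows cols st p lvl hlvl hInv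
    obtain ⟨hI2, hE2, hLe2, hM2, hN2, hP2⟩ := ih _ hI
    simp only [List.foldl_cons] at *
    refine ⟨hI2, by omega, by omega, ?_, ?_, ?_⟩
    · intro x hx
      rcases hM2 x hx with hx' | hx'
      · rcases hM x hx' with hx'' | hx''
        · exact Or.inl hx''
        · exact Or.inr hx''
      · exact Or.inr hx'
    · intro x hx
      rcases hN2 x hx with hx' | hx'
      · rcases hN x hx' with hx'' | hx''
        · exact Or.inl hx''
        · refine Or.inr ?_
          rw [hP2 x.1 x.2 (by rw [hx'']; omega)]
          exact hx''
      · exact Or.inr hx'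
    · intro a b hab
      rw [hP2 a b (by rw [hP a b hab]; exact hab), hP a b hab]

-- ---- fuel irrelevance and one-step unfoldings ----
theorem goA_nil (rows cols fuel : Nat) (h : List (List Int)) :
    goA rows cols fuel h [] = h := by
  cases fuel <;> rfl

theorem goB_nil (rows cols fuel : Nat) (h : List (List Int)) (lvl : Int) :
    goB rows cols fuel h [] lvl = h := by
  cases fuel <;> rfl

theorem goA_irrel (rows cols : Nat) : ∀ (f1 : Nat) (h : List (List Int))
    (q : List (Int × Int)) (f2 : Nat), InvG rows cols h → (∀ p ∈ q, InQ rows cols p) →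
    2 * mc h + q.length < f1 → 2 * mc h + q.length < f2 →
    goA rows cols f1 h q = goA rows cols f2 h q := by
  intro f1
  induction f1 with
  | zero => intro h q f2 _ _ h1 _; omega
  | succ a ih =>
    intro h q f2 hInv hq h1 h2
    cases q with
    | nil => rw [goA_nil, goA_nil]
    | cons p q' =>
      cases f2 with
      | zero => omega
      | succ b =>
        show goA rows cols a (expandA rows cols (h, q') p).1 (expandA rows cols (h, q') p).2
          = goA rows cols b (expandA rows cols (h, q') p).1 (expandA rows cols (h, q') p).2
        obtain ⟨hI, hE, hLe, hM⟩ := percellA rows cols (h, q') p hInv (hq p (by simp))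
        dsimp only at hE hLe
        simp only [List.length_cons] at h1 h2
        refine ih _ _ b hI ?_ (by omega) (by omega)
        intro x hx
        rcases hM x hx with hx' | hx'
        · exact hq x (by simp [hx'])
        · exact hx'

theorem goB_irrel (rows cols : Nat) : ∀ (f1 : Nat) (h : List (List Int))
    (f : List (Int × Int)) (lvl : Int) (f2 : Nat), InvG rows cols h → 0 ≤ lvl →
    mc h + f.length < f1 → mc h + f.length < f2 →
    goB rows cols f1 h f lvl = goB rows cols f2 h f lvl := by
  intro f1
  induction f1 with
  | zero => intro h f lvl f2 _ _ h1 _; omega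
  | succ a ih =>
    intro h f lvl f2 hInv hlvl h1 h2
    cases f with
    | nil => rw [goB_nil, goB_nil]
    | cons p f' =>
      cases f2 with
      | zero => omega
      | succ b =>
        show goB rows cols a ((p :: f').foldl (expandB rows cols (lvl + 1)) (h, [])).1
            ((p :: f').foldl (expandB rows cols (lvl + 1)) (h, [])).2 (lvl + 1)
          = goB rows cols b ((p :: f').foldl (expandB rows cols (lvl + 1)) (h, [])).1
            ((p :: f').foldl (expandB rows cols (lvl + 1)) (h, [])).2 (lvl + 1)
        obtain ⟨hI, hE, hLe, hM, hN, hP⟩ :=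
          levelB rows cols lvl hlvl (p :: f') (h, []) hInv
        dsimp only at hE hLe
        simp only [List.length_cons, List.length_nil, add_zero] at h1 h2 hE
        refine ih _ _ _ b hI (by omega) (by omega) (by omega)

theorem osA (rows cols : Nat) (h : List (List Int)) (p : Int × Int) (q : List (Int × Int))
    (hInv : InvG rows cols h) (hp : InQ rows cols p) (hq : ∀ x ∈ q, InQ rows cols x) :
    runA rows cols h (p :: q)
      = runA rows cols (expandA rows cols (h, q) p).1 (expandA rows cols (h, q) p).2 := by
  unfold runA
  have hfe : 2 * mc h + (p :: q).length + 1 = (2 * mc h + q.length + 1) + 1 := by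
    simp only [List.length_cons]; omega
  rw [hfe]
  show goA rows cols (2 * mc h + q.length + 1) (expandA rows cols (h, q) p).1
      (expandA rows cols (h, q) p).2 = _
  obtain ⟨hI, hE, hLe, hM⟩ := percellA rows cols (h, q) p hInv hp
  dsimp only at hE hLe
  refine goA_irrel rows cols _ _ _ _ hI ?_ (by omega) (by omega)
  intro x hx
  rcases hM x hx with hx' | hx'
  · exact hq x hx'
  · exact hx'

theorem osB (rows cols : Nat) (h : List (List Int)) (p : Int × Int) (f : List (Int × Int))
    (lvl : Int) (hInv : InvG rows cols h) (hlvl : 0 ≤ lvl) :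
    runB rows cols h (p :: f) lvl
      = runB rows cols ((p :: f).foldl (expandB rows cols (lvl + 1)) (h, [])).1
          ((p :: f).foldl (expandB rows cols (lvl + 1)) (h, [])).2 (lvl + 1) := by
  unfold runB
  have hfe : mc h + (p :: f).length + 1 = (mc h + f.length + 1) + 1 := by
    simp only [List.length_cons]; omega
  rw [hfe]
  show goB rows cols (mc h + f.length + 1)
      ((p :: f).foldl (expandB rows cols (lvl + 1)) (h, [])).1
      ((p :: f).foldl (expandB rows cols (lvl + 1)) (h, [])).2 (lvl + 1) = _
  obtain ⟨hI, hE, hLe, hM, hN, hP⟩ := levelB rows cols lvl hlvl (p :: f) (h, []) hInv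
  dsimp only at hE hLe
  simp only [List.length_nil, add_zero] at hE
  exact goB_irrel rows cols _ _ _ _ _ hI (by omega) (by omega) (by omega)

theorem splitA (rows cols : Nat) : ∀ (f : List (Int × Int)) (h : List (List Int))
    (r : List (Int × Int)), InvG rows cols h → (∀ p ∈ f, InQ rows cols p) →
    (∀ p ∈ r, InQ rows cols p) →
    runA rows cols h (f ++ r)
      = runA rows cols (f.foldl (expandA rows cols) (h, [])).1
          (r ++ (f.foldl (expandA rows cols) (h, [])).2) := by
  intro f
  induction f with
  | nil =>
    intro h r _ _ _
    simp
  | cons p f ih =>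
    intro h r hInv hf hr
    have hp := hf p (by simp)
    have hq : ∀ x ∈ f ++ r, InQ rows cols x := by
      intro x hx
      rcases List.mem_append.mp hx with hx' | hx'
      · exact hf x (by simp [hx'])
      · exact hr x hx'
    rw [List.cons_append, osA rows cols h p (f ++ r) hInv hp hq]
    rcases hE : expandA rows cols (h, []) p with ⟨E1, E2⟩
    have hloc : expandA rows cols (h, f ++ r) p = (E1, (f ++ r) ++ E2) := by
      rw [expandA_loc, hE]
    obtain ⟨hI, _, _, hM⟩ := percellA rows cols (h, []) p hInv hp
    rw [hE] at hI hM
    have hE2q : ∀ x ∈ E2, InQ rows cols x := by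
      intro x hx
      rcases hM x hx with hx' | hx'
      · simp at hx'
      · exact hx'
    rw [hloc]
    dsimp only
    rw [List.append_assoc]
    rw [ih E1 (r ++ E2) hI (fun x hx => hf x (by simp [hx])) (by
      intro x hx
      rcases List.mem_append.mp hx with hx' | hx'
      · exact hr x hx'
      · exact hE2q x hx')]
    rcases hF : f.foldl (expandA rows cols) (E1, []) with ⟨F1, F2⟩
    have hRHS : (p :: f).foldl (expandA rows cols) (h, []) = (F1, E2 ++ F2) := by
      rw [List.foldl_cons, hE,
        foldLoc (expandA rows cols) (fun h q p => expandA_loc rows cols h q p) f E1 E2, hF]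
    rw [hRHS]
    dsimp only
    simp [List.append_assoc]

-- ---- A's queue BFS equals the level-synchronous BFS ----
theorem SIM (rows cols : Nat) : ∀ (n : Nat) (h : List (List Int)) (f : List (Int × Int))
    (lvl : Int), mc h = n → InvG rows cols h → (∀ p ∈ f, InQ rows cols p) →
    (∀ p ∈ f, hget h p.1 p.2 = lvl) → 0 ≤ lvl →
    runA rows cols h f = runB rows cols h f lvl := by
  intro n
  induction n using Nat.strong_induction_on with
  | _ n ih =>
    intro h f lvl hmc hInv hf hlev hlvl
    cases f with
    | nil => unfold runA runB; rw [goA_nil, goB_nil]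
    | cons p f' =>
      have hsplit := splitA rows cols (p :: f') h [] hInv hf (by simp)
      rcases hF : (p :: f').foldl (expandB rows cols (lvl + 1)) (h, []) with ⟨F1, F2⟩
      have hAF : (p :: f').foldl (expandA rows cols) (h, []) = (F1, F2) := by
        rw [levelEq rows cols lvl hlvl (p :: f') h [] hInv hlev, hF]
      rw [List.append_nil, hAF] at hsplit
      dsimp only at hsplit
      obtain ⟨hI, hE, hLe, hM, hN, _⟩ := levelB rows cols lvl hlvl (p :: f') (h, []) hInv
      rw [hF] at hI hE hLe hM hN
      dsimp only at hI hE hLe hM hN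
      simp only [List.length_nil, add_zero] at hE
      have hosB := osB rows cols h p f' lvl hInv hlvl
      rw [hF] at hosB
      dsimp only at hosB
      rw [hsplit, hosB, List.nil_append]
      have hQok : ∀ x ∈ F2, InQ rows cols x := by
        intro x hx
        rcases hM x hx with hx' | hx'
        · simp at hx'
        · exact hx'
      have hHt : ∀ x ∈ F2, hget F1 x.1 x.2 = lvl + 1 := by
        intro x hx
        rcases hN x hx with hx' | hx'
        · simp at hx'
        · exact hx'
      cases F2 with
      | nil => unfold runA runB; rw [goA_nil, goB_nil]
      | cons y ys =>
        refine ih (mc F1) ?_ F1 (y :: ys) (lvl + 1) rfl hI hQok hHt (by omega)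
        simp only [List.length_cons] at hE
        omega

-- ---- initialisation ----
theorem initRow (iw : List (List Int)) (rows cols : Nat) (r : Nat) (hrr : r < rows) :
    ∀ (m : Nat), m ≤ cols → ∀ (st : List (List Int) × List (Int × Int)),
    Shape rows cols st.1 →
    Shape rows cols ((List.range m).foldl (fun st c =>
        if wat iw r c = 1 then (hset st.1 (r : Int) (c : Int) 0, st.2 ++ [((r : Int), (c : Int))])
        else st) st).1 ∧
    ((List.range m).foldl (fun st c =>
        if wat iw r c = 1 then (hset st.1 (r : Int) (c : Int) 0, st.2 ++ [((r : Int), (c : Int))])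
        else st) st).2
      = st.2 ++ (List.range m).filterMap (fun c =>
          if wat iw r c = 1 then some ((r : Int), (c : Int)) else none) ∧
    (∀ a b : Nat, a < rows → b < cols →
      hget ((List.range m).foldl (fun st c =>
          if wat iw r c = 1 then (hset st.1 (r : Int) (c : Int) 0, st.2 ++ [((r : Int), (c : Int))])
          else st) st).1 (a : Int) (b : Int)
        = if a = r ∧ b < m ∧ wat iw r b = 1 then 0 else hget st.1 (a : Int) (b : Int)) := by
  intro m
  induction m with
  | zero =>
    intro _ st hSh
    refine ⟨hSh, by simp, ?_⟩
    intro a b _ _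
    simp
  | succ m ih =>
    intro hm st hSh
    obtain ⟨hSh', hQ', hPt'⟩ := ih (by omega) st hSh
    simp only [List.range_succ, List.foldl_append, List.foldl_cons, List.foldl_nil,
      List.filterMap_append, List.filterMap_cons, List.filterMap_nil]
    by_cases hw : wat iw r m = 1
    · simp only [hw, if_true, reduceIte]
      have hr1 : ((r : Int)).toNat < ((List.range m).foldl (fun st c =>
          if wat iw r c = 1 then (hset st.1 (r : Int) (c : Int) 0, st.2 ++ [((r : Int), (c : Int))])
          else st) st).1.length := by
        simp only [Int.toNat_natCast]
        rw [hSh'.1]; omega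
      have hc1 : ((m : Int)).toNat < (((List.range m).foldl (fun st c =>
          if wat iw r c = 1 then (hset st.1 (r : Int) (c : Int) 0, st.2 ++ [((r : Int), (c : Int))])
          else st) st).1.getD ((r : Int)).toNat []).length := by
        simp only [Int.toNat_natCast]
        have hmem : (((List.range m).foldl (fun st c =>
            if wat iw r c = 1 then (hset st.1 (r : Int) (c : Int) 0, st.2 ++ [((r : Int), (c : Int))])
            else st) st).1.getD r []) ∈ ((List.range m).foldl (fun st c =>
            if wat iw r c = 1 then (hset st.1 (r : Int) (c : Int) 0, st.2 ++ [((r : Int), (c : Int))])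
            else st) st).1 := by
          rw [List.getD_eq_getElem _ _ (by rw [hSh'.1]; omega : r < _)]
          exact List.getElem_mem _
        rw [hSh'.2 _ hmem]; omega
      refine ⟨shape_hset rows cols _ _ _ _ hSh', by rw [hQ']; simp, ?_⟩
      intro a b ha hb
      by_cases hab : a = r ∧ b = m
      · obtain ⟨rfl, rfl⟩ := hab
        rw [hget_hset_self _ _ _ _ hr1 hc1]
        simp [hw]
      · have hne : ((r : Int)).toNat ≠ ((a : Int)).toNat ∨ ((m : Int)).toNat ≠ ((b : Int)).toNat := by
          simp only [Int.toNat_natCast]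
          by_cases h1 : a = r
          · right; intro h2; exact hab ⟨h1, h2.symm⟩
          · left; intro h2; exact h1 h2.symm
        rw [hget_hset_ne _ _ _ _ _ _ hne, hPt' a b ha hb]
        by_cases h1 : a = r ∧ b < m ∧ wat iw r b = 1
        · rw [if_pos h1, if_pos ⟨h1.1, by omega, h1.2.2⟩]
        · rw [if_neg h1]
          rw [if_neg ?_]
          intro ⟨g1, g2, g3⟩
          by_cases hbm : b = m
          · exact hab ⟨g1, hbm⟩
          · exact h1 ⟨g1, by omega, g3⟩
    · simp only [hw, if_false, reduceIte]
      refine ⟨hSh', by rw [hQ']; simp, ?_⟩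
      intro a b ha hb
      rw [hPt' a b ha hb]
      by_cases h1 : a = r ∧ b < m ∧ wat iw r b = 1
      · rw [if_pos h1, if_pos ⟨h1.1, by omega, h1.2.2⟩]
      · rw [if_neg h1]
        rw [if_neg ?_]
        intro ⟨g1, g2, g3⟩
        by_cases hbm : b = m
        · rw [hbm] at g3; exact hw g3
        · exact h1 ⟨g1, by omega, g3⟩

theorem initAll (iw : List (List Int)) (rows cols : Nat) :
    ∀ (n : Nat), n ≤ rows →
    Shape rows cols ((List.range n).foldl (fun st r =>
        (List.range cols).foldl (fun st c =>
            if wat iw r c = 1 then (hset st.1 (r : Int) (c : Int) 0, st.2 ++ [((r : Int), (c : Int))])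
            else st) st)
      (List.replicate rows (List.replicate cols (-1)), [])).1 ∧
    ((List.range n).foldl (fun st r =>
        (List.range cols).foldl (fun st c =>
            if wat iw r c = 1 then (hset st.1 (r : Int) (c : Int) 0, st.2 ++ [((r : Int), (c : Int))])
            else st) st)
      (List.replicate rows (List.replicate cols (-1)), [])).2
      = (List.range n).flatMap (fun r => (List.range cols).filterMap (fun c =>
          if wat iw r c = 1 then some ((r : Int), (c : Int)) else none)) ∧
    (∀ a b : Nat, a < rows → b < cols →
      hget ((List.range n).foldl (fun st r =>
          (List.range cols).foldl (fun st c =>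
              if wat iw r c = 1 then (hset st.1 (r : Int) (c : Int) 0, st.2 ++ [((r : Int), (c : Int))])
              else st) st)
        (List.replicate rows (List.replicate cols (-1)), [])).1 (a : Int) (b : Int)
        = if a < n ∧ wat iw a b = 1 then 0 else -1) := by
  intro n
  induction n with
  | zero =>
    intro _
    refine ⟨⟨by simp, ?_⟩, by simp, ?_⟩
    · intro row hm
      rw [List.eq_of_mem_replicate hm]
      simp
    · intro a b ha hb
      unfold hget
      simp only [Int.toNat_natCast, List.range_zero, List.foldl_nil]
      have h1 : (List.replicate rows (List.replicate cols (-1 : Int))).getD a []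
          = List.replicate cols (-1) := by
        rw [List.getD_eq_getElem _ _ (by simpa using ha)]
        simp
      rw [h1, List.getD_eq_getElem _ _ (by simpa using hb)]
      simp
  | succ n ih =>
    intro hn
    obtain ⟨hSh, hQ, hPt⟩ := ih (by omega)
    simp only [List.range_succ, List.foldl_append, List.foldl_cons, List.foldl_nil,
      List.flatMap_append, List.flatMap_cons, List.flatMap_nil]
    obtain ⟨hSh', hQ', hPt'⟩ := initRow iw rows cols n (by omega) cols (le_refl _) _ hSh
    refine ⟨hSh', by rw [hQ', hQ]; simp, ?_⟩
    intro a b ha hb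
    rw [hPt' a b ha hb, hPt a b ha hb]
    by_cases han : a = n
    · subst han
      by_cases hw : wat iw a b = 1
      · simp [hw, hb]
      · simp [hw]
    · simp [han, show a < n + 1 ↔ a < n by omega]

theorem initA_char (iw : List (List Int)) (rows cols : Nat) :
    Shape rows cols (initA iw rows cols).1 ∧
    (initA iw rows cols).2 = (List.range rows).flatMap (fun r =>
        (List.range cols).filterMap (fun c =>
          if wat iw r c = 1 then some ((r : Int), (c : Int)) else none)) ∧
    (∀ a b : Nat, a < rows → b < cols →
      hget (initA iw rows cols).1 (a : Int) (b : Int)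
        = if wat iw a b = 1 then 0 else -1) := by
  unfold initA
  have h := initAll iw rows cols rows (le_refl _)
  refine ⟨h.1, h.2.1, ?_⟩
  intro a b ha hb
  rw [h.2.2 a b ha hb]
  simp [ha]

theorem grid_ext (rows cols : Nat) (g₁ g₂ : List (List Int))
    (h₁ : Shape rows cols g₁) (h₂ : Shape rows cols g₂)
    (hp : ∀ a b : Nat, a < rows → b < cols →
      hget g₁ (a : Int) (b : Int) = hget g₂ (a : Int) (b : Int)) : g₁ = g₂ := by
  apply List.ext_getElem (by rw [h₁.1, h₂.1])
  intro i hi1 hi2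
  apply List.ext_getElem (by rw [h₁.2 _ (List.getElem_mem hi1), h₂.2 _ (List.getElem_mem hi2)])
  intro j hj1 hj2
  have hi : i < rows := by rw [← h₁.1]; exact hi1
  have hj : j < cols := by rw [← h₁.2 _ (List.getElem_mem hi1)]; exact hj1
  have hpt := hp i j hi hj
  unfold hget at hpt
  simp only [Int.toNat_natCast] at hpt
  rw [List.getD_eq_getElem _ _ hi1, List.getD_eq_getElem _ _ hj1,
    List.getD_eq_getElem _ _ hi2, List.getD_eq_getElem _ _ hj2] at hpt
  exact hpt

-- ---- the initial grid and the water list, standalone characterisations ----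
theorem h0_shape (iw : List (List Int)) (rows cols : Nat) :
    Shape rows cols ((List.range rows).map (fun r =>
      (List.range cols).map (fun c => if wat iw r c = 1 then 0 else -1))) := by
  constructor
  · simp
  · intro row hm
    simp only [List.mem_map, List.mem_range] at hm
    obtain ⟨r, _, rfl⟩ := hm
    simp

theorem h0_pt (iw : List (List Int)) (rows cols : Nat) (a b : Nat)
    (ha : a < rows) (hb : b < cols) :
    hget ((List.range rows).map (fun r =>
      (List.range cols).map (fun c => if wat iw r c = 1 then 0 else -1))) (a : Int) (b : Int)
      = if wat iw a b = 1 then 0 else -1 := by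
  unfold hget
  simp only [Int.toNat_natCast]
  have h1 : ((List.range rows).map (fun r =>
      (List.range cols).map (fun c => if wat iw r c = 1 then 0 else -1))).getD a []
      = (List.range cols).map (fun c => if wat iw a c = 1 then 0 else -1) := by
    rw [List.getD_eq_getElem _ _ (by simpa using ha)]
    simp
  rw [h1, List.getD_eq_getElem _ _ (by simpa using hb)]
  simp

theorem h0_invG (iw : List (List Int)) (rows cols : Nat) :
    InvG rows cols ((List.range rows).map (fun r =>
      (List.range cols).map (fun c => if wat iw r c = 1 then 0 else -1))) := by
  refine ⟨h0_shape iw rows cols, ?_⟩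
  intro row hm v hv
  simp only [List.mem_map, List.mem_range] at hm
  obtain ⟨r, _, rfl⟩ := hm
  simp only [List.mem_map, List.mem_range] at hv
  obtain ⟨c, _, hveq⟩ := hv
  split_ifs at hveq <;> omega

theorem mem_waterlist (iw : List (List Int)) (rows cols : Nat) (p : Int × Int) :
    p ∈ (List.range rows).flatMap (fun r =>
        (List.range cols).filterMap (fun c =>
          if wat iw r c = 1 then some ((r : Int), (c : Int)) else none))
      ↔ ∃ a b : Nat, a < rows ∧ b < cols ∧ p = ((a : Int), (b : Int)) ∧ wat iw a b = 1 := by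
  simp only [List.mem_flatMap, List.mem_filterMap, List.mem_range]
  constructor
  · rintro ⟨r, hr, c, hc, heq⟩
    split_ifs at heq with hw
    · cases heq
      exact ⟨r, c, hr, hc, rfl, hw⟩
  · rintro ⟨a, b, ha, hb, rfl, hw⟩
    exact ⟨a, ⟨ha, b, hb, by rw [if_pos hw]⟩⟩

theorem waterlist_inQ (iw : List (List Int)) (rows cols : Nat) (p : Int × Int)
    (hp : p ∈ (List.range rows).flatMap (fun r =>
        (List.range cols).filterMap (fun c =>
          if wat iw r c = 1 then some ((r : Int), (c : Int)) else none))) :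
    InQ rows cols p := by
  rw [mem_waterlist] at hp
  obtain ⟨a, b, ha, hb, rfl, _⟩ := hp
  refine ⟨?_, ?_, ?_, ?_⟩ <;> simp <;> omega

theorem inQ_cast (rows cols : Nat) (x : Int × Int) (hx : InQ rows cols x) :
    ∃ a b : Nat, a < rows ∧ b < cols ∧ x = ((a : Int), (b : Int)) := by
  obtain ⟨h1, h2, h3, h4⟩ := hx
  refine ⟨x.1.toNat, x.2.toNat, by omega, by omega, ?_⟩
  cases x
  simp only at h1 h3 ⊢
  rw [Int.toNat_of_nonneg h1, Int.toNat_of_nonneg h3]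

-- ---- Dmin: minimum characterisation, Lipschitz property, step-toward ----
theorem foldl_min_le_init (l : List Int) : ∀ a : Int, l.foldl min a ≤ a := by
  induction l with
  | nil => intro a; simp
  | cons b t ih =>
    intro a
    calc t.foldl min (min a b) ≤ min a b := ih (min a b)
      _ ≤ a := min_le_left _ _

theorem foldl_min_le_mem (l : List Int) : ∀ (a b : Int), b ∈ l → l.foldl min a ≤ b := by
  induction l with
  | nil => intro a b hb; simp at hb
  | cons c t ih =>
    intro a b hb
    rcases List.mem_cons.mp hb with rfl | hb'
    · calc t.foldl min (min a b) ≤ min a b := foldl_min_le_init t _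
        _ ≤ b := min_le_right _ _
    · exact ih _ b hb'

theorem foldl_min_cases (l : List Int) : ∀ a : Int, l.foldl min a = a ∨ l.foldl min a ∈ l := by
  induction l with
  | nil => intro a; simp
  | cons c t ih =>
    intro a
    rcases ih (min a c) with h | h
    · simp only [List.foldl_cons]
      rcases min_cases a c with ⟨he, _⟩ | ⟨he, _⟩
      · left; rw [h, he]
      · right; rw [h, he]; simp
    · right
      simp only [List.foldl_cons]
      exact List.mem_cons_of_mem _ h

theorem Dmin_le (w0 : Int × Int) (ws : List (Int × Int)) (x : Int × Int) :
    ∀ p ∈ w0 :: ws, Dmin w0 ws x ≤ mdist x p := by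
  intro p hp
  rcases List.mem_cons.mp hp with rfl | hp'
  · exact foldl_min_le_init _ _
  · exact foldl_min_le_mem _ _ _ (List.mem_map_of_mem hp')

theorem Dmin_mem (w0 : Int × Int) (ws : List (Int × Int)) (x : Int × Int) :
    ∃ p ∈ w0 :: ws, Dmin w0 ws x = mdist x p := by
  rcases foldl_min_cases (ws.map (fun w => mdist x w)) (mdist x w0) with h | h
  · exact ⟨w0, by simp, h⟩
  · simp only [List.mem_map] at h
    obtain ⟨p, hp, he⟩ := h
    exact ⟨p, List.mem_cons_of_mem _ hp, he.symm⟩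

theorem mdist_nonneg (x w : Int × Int) : 0 ≤ mdist x w := by
  unfold mdist; omega

theorem Dmin_nonneg (w0 : Int × Int) (ws : List (Int × Int)) (x : Int × Int) :
    0 ≤ Dmin w0 ws x := by
  obtain ⟨p, _, he⟩ := Dmin_mem w0 ws x
  rw [he]; exact mdist_nonneg x p

theorem mem_nbrs (x y : Int × Int) :
    y ∈ nbrs x ↔ (y.1 = x.1 + 1 ∧ y.2 = x.2) ∨ (y.1 = x.1 - 1 ∧ y.2 = x.2)
      ∨ (y.1 = x.1 ∧ y.2 = x.2 + 1) ∨ (y.1 = x.1 ∧ y.2 = x.2 - 1) := by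
  simp [nbrs, Prod.ext_iff]

theorem nbrs_symm (x y : Int × Int) (h : y ∈ nbrs x) : x ∈ nbrs y := by
  rw [mem_nbrs] at h ⊢
  omega

theorem mdist_lip (x y w : Int × Int) (h : y ∈ nbrs x) : mdist x w ≤ mdist y w + 1 := by
  rw [mem_nbrs] at h
  unfold mdist
  rcases h with ⟨h1, h2⟩ | ⟨h1, h2⟩ | ⟨h1, h2⟩ | ⟨h1, h2⟩ <;> rw [h1, h2] <;> omega

theorem Dmin_lip (w0 : Int × Int) (ws : List (Int × Int)) (x y : Int × Int)
    (h : y ∈ nbrs x) : Dmin w0 ws x ≤ Dmin w0 ws y + 1 := by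
  obtain ⟨p, hp, he⟩ := Dmin_mem w0 ws y
  calc Dmin w0 ws x ≤ mdist x p := Dmin_le w0 ws x p hp
    _ ≤ mdist y p + 1 := mdist_lip x y p h
    _ = Dmin w0 ws y + 1 := by rw [he]

theorem Dmin_zero_iff (w0 : Int × Int) (ws : List (Int × Int)) (x : Int × Int) :
    Dmin w0 ws x = 0 ↔ x ∈ w0 :: ws := by
  constructor
  · intro h
    obtain ⟨p, hp, he⟩ := Dmin_mem w0 ws x
    have : mdist x p = 0 := by omega
    have hx : x = p := by
      unfold mdist at this
      cases x; cases p
      simp only [Prod.mk.injEq]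
      simp only at this
      omega
    rw [hx]; exact hp
  · intro h
    have h1 : Dmin w0 ws x ≤ mdist x x := Dmin_le w0 ws x x h
    have h2 : mdist x x = 0 := by unfold mdist; omega
    have h3 := Dmin_nonneg w0 ws x
    omega

theorem step_toward (rows cols : Nat) (w0 : Int × Int) (ws : List (Int × Int))
    (hW : ∀ p ∈ w0 :: ws, InQ rows cols p) (x : Int × Int) (hx : InQ rows cols x)
    (h1 : 1 ≤ Dmin w0 ws x) :
    ∃ y ∈ nbrs x, InQ rows cols y ∧ Dmin w0 ws y = Dmin w0 ws x - 1 := by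
  obtain ⟨p, hp, he⟩ := Dmin_mem w0 ws x
  have hpin := hW p hp
  obtain ⟨hx1, hx2, hx3, hx4⟩ := hx
  obtain ⟨hp1, hp2, hp3, hp4⟩ := hpin
  have hstep : ∃ y : Int × Int, y ∈ nbrs x ∧ InQ rows cols y ∧ mdist y p = mdist x p - 1 := by
    by_cases ha : x.1 < p.1
    · refine ⟨(x.1 + 1, x.2), by rw [mem_nbrs]; simp, ⟨by simp; omega, by simp; omega,
        by simpa using hx3, by simpa using hx4⟩, ?_⟩
      unfold mdist; simp only; omega
    · by_cases hb : p.1 < x.1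
      · refine ⟨(x.1 - 1, x.2), by rw [mem_nbrs]; simp, ⟨by simp; omega, by simp; omega,
          by simpa using hx3, by simpa using hx4⟩, ?_⟩
        unfold mdist; simp only; omega
      · by_cases hc : x.2 < p.2
        · refine ⟨(x.1, x.2 + 1), by rw [mem_nbrs]; simp, ⟨by simpa using hx1,
            by simpa using hx2, by simp; omega, by simp; omega⟩, ?_⟩
          unfold mdist; simp only; omega
        · by_cases hd : p.2 < x.2
          · refine ⟨(x.1, x.2 - 1), by rw [mem_nbrs]; simp, ⟨by simpa using hx1,
              by simpa using hx2, by simp; omega, by simp; omega⟩, ?_⟩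
            unfold mdist; simp only; omega
          · exfalso
            have : mdist x p = 0 := by unfold mdist; omega
            omega
  obtain ⟨y, hy, hyin, hyd⟩ := hstep
  refine ⟨y, hy, hyin, ?_⟩
  have hle : Dmin w0 ws y ≤ Dmin w0 ws x - 1 := by
    have := Dmin_le w0 ws y p hp
    omega
  have hge : Dmin w0 ws x ≤ Dmin w0 ws y + 1 :=
    Dmin_lip w0 ws x y hy
  omega

theorem exists_level (rows cols : Nat) (w0 : Int × Int) (ws : List (Int × Int))
    (hW : ∀ p ∈ w0 :: ws, InQ rows cols p) :
    ∀ (n : Nat) (x : Int × Int), InQ rows cols x → Dmin w0 ws x = (n : Int) →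
    ∀ k : Int, 0 ≤ k → k ≤ (n : Int) → ∃ y, InQ rows cols y ∧ Dmin w0 ws y = k := by
  intro n
  induction n with
  | zero =>
    intro x hx hd k hk1 hk2
    exact ⟨x, hx, by omega⟩
  | succ n ih =>
    intro x hx hd k hk1 hk2
    by_cases hke : k = ((n : Int) + 1)
    · exact ⟨x, hx, by push_cast at hd; omega⟩
    · obtain ⟨y, _, hyin, hyd⟩ := step_toward rows cols w0 ws hW x hx (by push_cast at hd; omega)
      refine ih y hyin (by push_cast at hd ⊢; omega) k hk1 (by push_cast at hk2; omega)

-- ---- pointwise/membership characterisation of one BFS level ----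
theorem inQ_pair_eq (rows cols : Nat) (x n : Int × Int)
    (hx : InQ rows cols x) (hn : InQ rows cols n) (hne : x ≠ n) :
    x.1.toNat ≠ n.1.toNat ∨ x.2.toNat ≠ n.2.toNat := by
  obtain ⟨a1, a2, a3, a4⟩ := hx
  obtain ⟨b1, b2, b3, b4⟩ := hn
  by_contra hcon
  push_neg at hcon
  apply hne
  cases x; cases n
  simp only at a1 a3 b1 b3 hcon ⊢
  have := hcon.1; have := hcon.2
  simp only [Prod.mk.injEq]
  omega

theorem shape_stepFold (rows cols : Nat) (val : List (List Int) → Int)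
    (l : List (Int × Int)) : ∀ st, Shape rows cols st.1 →
    Shape rows cols (stepFold rows cols val st l).1 := by
  induction l with
  | nil => intro st h; exact h
  | cons n l ih =>
    intro st h
    rw [stepFold_cons]
    apply ih
    unfold pvStep
    split
    · exact shape_hset rows cols st.1 n.1 n.2 _ h
    · exact h

theorem stepFold_const_char (rows cols : Nat) (v : Int) (hv : v ≠ -1)
    (l : List (Int × Int)) : ∀ (st : List (List Int) × List (Int × Int)),
    Shape rows cols st.1 →
    (∀ x : Int × Int, InQ rows cols x →
      hget (stepFold rows cols (fun _ => v) st l).1 x.1 x.2 =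
        if hget st.1 x.1 x.2 = -1 ∧ x ∈ l then v else hget st.1 x.1 x.2) ∧
    (∀ y : Int × Int, y ∈ (stepFold rows cols (fun _ => v) st l).2 ↔
        y ∈ st.2 ∨ (InQ rows cols y ∧ hget st.1 y.1 y.2 = -1 ∧ y ∈ l)) := by
  induction l with
  | nil =>
    intro st _
    refine ⟨fun x _ => by simp [stepFold], fun y => by simp [stepFold]⟩
  | cons n l ih =>
    intro st hSh
    rw [stepFold_cons]
    by_cases hcond0 : 0 ≤ n.1 ∧ n.1 < (rows : Int) ∧ 0 ≤ n.2 ∧ n.2 < (cols : Int)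
        ∧ hget st.1 n.1 n.2 = -1
    · have hstep : pvStep rows cols (fun _ => v) st n.1 n.2
          = (hset st.1 n.1 n.2 v, st.2 ++ [n]) := by
        unfold pvStep
        rw [if_pos hcond0]
      have hnq : InQ rows cols n := ⟨hcond0.1, hcond0.2.1, hcond0.2.2.1, hcond0.2.2.2.1⟩
      have hn1 : hget st.1 n.1 n.2 = -1 := hcond0.2.2.2.2
      have hr : n.1.toNat < st.1.length := by
        obtain ⟨hlen, _⟩ := hSh
        obtain ⟨a1, a2, _, _⟩ := hnq
        omega
      have hc : n.2.toNat < (st.1.getD n.1.toNat []).length := by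
        obtain ⟨hlen, hrow⟩ := hSh
        obtain ⟨_, _, a3, a4⟩ := hnq
        have hmem : (st.1.getD n.1.toNat []) ∈ st.1 := by
          rw [List.getD_eq_getElem _ _ hr]; exact List.getElem_mem hr
        rw [hrow _ hmem]; omega
      have hSh' : Shape rows cols (hset st.1 n.1 n.2 v) :=
        shape_hset rows cols st.1 n.1 n.2 v hSh
      rw [hstep]
      obtain ⟨ihp, ihm⟩ := ih (hset st.1 n.1 n.2 v, st.2 ++ [n]) hSh'
      constructor
      · intro x hx
        by_cases hxn : x = n
        · subst hxn
          have hself : hget (hset st.1 x.1 x.2 v) x.1 x.2 = v :=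
            hget_hset_self st.1 x.1 x.2 v hr hc
          rw [ihp x hx]
          simp only [hself]
          rw [if_neg (by intro hcc; exact hv hcc.1), if_pos ⟨hn1, by simp⟩]
        · have hne := inQ_pair_eq rows cols x n hx hnq hxn
          have hpres : hget (hset st.1 n.1 n.2 v) x.1 x.2 = hget st.1 x.1 x.2 := by
            apply hget_hset_ne
            tauto
          rw [ihp x hx]
          simp only [hpres]
          have hmem : x ∈ n :: l ↔ x ∈ l := by
            simp [List.mem_cons, hxn]
          simp only [hmem]
      · intro y
        rw [ihm y]
        by_cases hyn : y = n
        · subst hyn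
          constructor
          · intro _
            exact Or.inr ⟨hnq, hn1, by simp⟩
          · intro _
            left
            simp
        · have hne := inQ_pair_eq rows cols y n
          have hpres : ∀ hyq : InQ rows cols y, hget (hset st.1 n.1 n.2 v) y.1 y.2 = hget st.1 y.1 y.2 := by
            intro hyq
            apply hget_hset_ne
            have := hne hyq hnq hyn
            tauto
          constructor
          · rintro (hy | ⟨hyq, hy1, hyl⟩)
            · rcases List.mem_append.mp hy with hy' | hy'
              · exact Or.inl hy'
              · simp at hy'; exact absurd hy' hyn
            · rw [hpres hyq] at hy1
              exact Or.inr ⟨hyq, hy1, List.mem_cons_of_mem _ hyl⟩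
          · rintro (hy | ⟨hyq, hy1, hyl⟩)
            · exact Or.inl (List.mem_append.mpr (Or.inl hy))
            · rcases List.mem_cons.mp hyl with rfl | hyl'
              · exact absurd rfl hyn
              · exact Or.inr ⟨hyq, by rw [hpres hyq]; exact hy1, hyl'⟩
    · have hstep : pvStep rows cols (fun _ => v) st n.1 n.2 = st := by
        unfold pvStep
        rw [if_neg hcond0]
      have hcond : ¬ (InQ rows cols n ∧ hget st.1 n.1 n.2 = -1) := by
        rintro ⟨⟨a1, a2, a3, a4⟩, a5⟩
        exact hcond0 ⟨a1, a2, a3, a4, a5⟩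
      rw [hstep]
      obtain ⟨ihp, ihm⟩ := ih st hSh
      constructor
      · intro x hx
        rw [ihp x hx]
        by_cases hxn : x = n
        · subst hxn
          have hx1 : hget st.1 x.1 x.2 ≠ -1 := fun hcc => hcond ⟨hx, hcc⟩
          rw [if_neg (by tauto), if_neg (by tauto)]
        · have hmem : x ∈ n :: l ↔ x ∈ l := by simp [List.mem_cons, hxn]
          simp only [hmem]
      · intro y
        rw [ihm y]
        by_cases hyn : y = n
        · subst hyn
          constructor
          · rintro (hy | ⟨hyq, hy1, hyl⟩)
            · exact Or.inl hy
            · exact Or.inr ⟨hyq, hy1, List.mem_cons_of_mem _ hyl⟩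
          · rintro (hy | ⟨hyq, hy1, hyl⟩)
            · exact Or.inl hy
            · exact absurd ⟨hyq, hy1⟩ hcond
        · have hmem : y ∈ n :: l ↔ y ∈ l := by simp [List.mem_cons, hyn]
          rw [hmem]

theorem levelFold_char (rows cols : Nat) (v : Int) (hv : v ≠ -1)
    (f : List (Int × Int)) : ∀ (st : List (List Int) × List (Int × Int)),
    Shape rows cols st.1 →
    (∀ x : Int × Int, InQ rows cols x →
      hget (f.foldl (expandB rows cols v) st).1 x.1 x.2 =
        if hget st.1 x.1 x.2 = -1 ∧ (∃ p ∈ f, x ∈ nbrs p) then v else hget st.1 x.1 x.2) ∧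
    (∀ y : Int × Int, y ∈ (f.foldl (expandB rows cols v) st).2 ↔
        y ∈ st.2 ∨ (InQ rows cols y ∧ hget st.1 y.1 y.2 = -1 ∧ ∃ p ∈ f, y ∈ nbrs p)) := by
  induction f with
  | nil =>
    intro st _
    exact ⟨fun x _ => by simp, fun y => by simp⟩
  | cons p f ih =>
    intro st hSh
    simp only [List.foldl_cons]
    rw [expandB_eq_stepFold]
    obtain ⟨hp1, hp2⟩ := stepFold_const_char rows cols v hv (nbrs p) st hSh
    have hSh1 : Shape rows cols (stepFold rows cols (fun _ => v) st (nbrs p)).1 :=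
      shape_stepFold rows cols _ _ st hSh
    obtain ⟨ihp, ihm⟩ := ih _ hSh1
    constructor
    · intro x hx
      have e1 := hp1 x hx
      have e2 := ihp x hx
      by_cases c1 : hget st.1 x.1 x.2 = -1
      · by_cases c2 : x ∈ nbrs p
        · rw [if_pos ⟨c1, c2⟩] at e1
          rw [e2, e1, if_neg (fun hcc => hv hcc.1),
            if_pos ⟨c1, p, List.mem_cons_self, c2⟩]
        · rw [if_neg (fun hcc => c2 hcc.2)] at e1
          rw [e2, e1]
          by_cases c3 : ∃ q ∈ f, x ∈ nbrs q
          · obtain ⟨q, hq, hxq⟩ := c3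
            rw [if_pos ⟨c1, q, hq, hxq⟩,
              if_pos ⟨c1, q, List.mem_cons_of_mem _ hq, hxq⟩]
          · rw [if_neg (by rintro ⟨_, q, hq, hxq⟩; exact c3 ⟨q, hq, hxq⟩)]
            rw [if_neg (by
              rintro ⟨_, q, hq, hxq⟩
              rcases List.mem_cons.mp hq with rfl | hq'
              · exact c2 hxq
              · exact c3 ⟨q, hq', hxq⟩)]
      · rw [if_neg (fun hcc => c1 hcc.1)] at e1
        rw [e2, e1, if_neg (fun hcc => c1 hcc.1), if_neg (fun hcc => c1 hcc.1)]
    · intro y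
      rw [ihm y, hp2 y]
      by_cases hyq : InQ rows cols y
      · by_cases c1 : hget st.1 y.1 y.2 = -1
        · by_cases c2 : y ∈ nbrs p
          · have hval : hget (stepFold rows cols (fun _ => v) st (nbrs p)).1 y.1 y.2 = v := by
              rw [hp1 y hyq, if_pos ⟨c1, c2⟩]
            constructor
            · intro _; exact Or.inr ⟨hyq, c1, p, by simp, c2⟩
            · intro _; exact Or.inl (Or.inr ⟨hyq, c1, c2⟩)
          · have hval : hget (stepFold rows cols (fun _ => v) st (nbrs p)).1 y.1 y.2
                = hget st.1 y.1 y.2 := by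
              rw [hp1 y hyq, if_neg (by tauto)]
            constructor
            · rintro ((hy | ⟨_, _, hyl⟩) | ⟨_, hy1, q, hq, hyq'⟩)
              · exact Or.inl hy
              · exact absurd hyl c2
              · exact Or.inr ⟨hyq, by rw [hval] at hy1; exact hy1, q, List.mem_cons_of_mem _ hq, hyq'⟩
            · rintro (hy | ⟨_, hy1, q, hq, hyq'⟩)
              · exact Or.inl (Or.inl hy)
              · rcases List.mem_cons.mp hq with rfl | hq'
                · exact absurd hyq' c2
                · exact Or.inr ⟨hyq, by rw [hval]; exact hy1, q, hq', hyq'⟩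
        · have hval : hget (stepFold rows cols (fun _ => v) st (nbrs p)).1 y.1 y.2
              = hget st.1 y.1 y.2 := by
            rw [hp1 y hyq, if_neg (by tauto)]
          constructor
          · rintro ((hy | ⟨_, hy1, _⟩) | ⟨_, hy1, _⟩)
            · exact Or.inl hy
            · exact absurd hy1 c1
            · rw [hval] at hy1; exact absurd hy1 c1
          · rintro (hy | ⟨_, hy1, _⟩)
            · exact Or.inl (Or.inl hy)
            · exact absurd hy1 c1
      · constructor
        · rintro ((hy | ⟨hq, _, _⟩) | ⟨hq, _, _⟩)
          · exact Or.inl hy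
          · exact absurd hq hyq
          · exact absurd hq hyq
        · rintro (hy | ⟨hq, _, _⟩)
          · exact Or.inl (Or.inl hy)
          · exact absurd hq hyq

-- ---- one level preserves the distance invariant ----
theorem level_step (rows cols : Nat) (w0 : Int × Int) (ws : List (Int × Int))
    (hW : ∀ p ∈ w0 :: ws, InQ rows cols p)
    (h : List (List Int)) (f : List (Int × Int)) (k : Int) (hk : 0 ≤ k)
    (hSh : Shape rows cols h)
    (hpt : ∀ x : Int × Int, InQ rows cols x →
      hget h x.1 x.2 = if Dmin w0 ws x ≤ k then Dmin w0 ws x else -1)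
    (hfr : ∀ p : Int × Int, p ∈ f ↔ InQ rows cols p ∧ Dmin w0 ws p = k) :
    (∀ x : Int × Int, InQ rows cols x →
      hget (f.foldl (expandB rows cols (k + 1)) (h, [])).1 x.1 x.2
        = if Dmin w0 ws x ≤ k + 1 then Dmin w0 ws x else -1) ∧
    (∀ y : Int × Int, y ∈ (f.foldl (expandB rows cols (k + 1)) (h, [])).2
        ↔ InQ rows cols y ∧ Dmin w0 ws y = k + 1) := by
  obtain ⟨hc1, hc2⟩ := levelFold_char rows cols (k + 1) (by omega) f (h, []) hSh
  have key : ∀ x : Int × Int, InQ rows cols x →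
      ((hget h x.1 x.2 = -1 ∧ ∃ p ∈ f, x ∈ nbrs p) ↔ Dmin w0 ws x = k + 1) := by
    intro x hx
    constructor
    · rintro ⟨h1, p, hp, hxp⟩
      obtain ⟨hpq, hpd⟩ := (hfr p).mp hp
      have hle : Dmin w0 ws x ≤ k + 1 := by
        have := Dmin_lip w0 ws x p (nbrs_symm p x hxp)
        omega
      have hgt : ¬ Dmin w0 ws x ≤ k := by
        intro hcc
        rw [hpt x hx, if_pos hcc] at h1
        have := Dmin_nonneg w0 ws x
        omega
      omega
    · intro hd
      have h1 : hget h x.1 x.2 = -1 := by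
        rw [hpt x hx, if_neg (by omega)]
      obtain ⟨y, hy, hyin, hyd⟩ := step_toward rows cols w0 ws hW x hx (by omega)
      refine ⟨h1, y, (hfr y).mpr ⟨hyin, by omega⟩, nbrs_symm x y hy⟩
  constructor
  · intro x hx
    rw [hc1 x hx]
    dsimp only
    by_cases hd : Dmin w0 ws x = k + 1
    · rw [if_pos ((key x hx).mpr hd), if_pos (by omega), hd]
    · rw [if_neg (fun hcc => hd ((key x hx).mp hcc))]
      rw [hpt x hx]
      by_cases hle : Dmin w0 ws x ≤ k
      · rw [if_pos hle, if_pos (by omega)]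
      · rw [if_neg hle, if_neg (by omega)]
  · intro y
    rw [hc2 y]
    dsimp only
    constructor
    · rintro (hy | ⟨hyq, hy1, p, hp, hyp⟩)
      · simp at hy
      · exact ⟨hyq, (key y hyq).mp ⟨hy1, p, hp, hyp⟩⟩
    · rintro ⟨hyq, hyd⟩
      obtain ⟨h1, p, hp, hyp⟩ := (key y hyq).mpr hyd
      exact Or.inr ⟨hyq, h1, p, hp, hyp⟩

-- ---- grid fully assigned: it equals the distance grid ----
theorem done_grid (rows cols : Nat) (w0 : Int × Int) (ws : List (Int × Int))
    (hW : ∀ p ∈ w0 :: ws, InQ rows cols p)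
    (h : List (List Int)) (k : Int) (hk : 0 ≤ k)
    (hSh : Shape rows cols h)
    (hpt : ∀ x : Int × Int, InQ rows cols x →
      hget h x.1 x.2 = if Dmin w0 ws x ≤ k then Dmin w0 ws x else -1)
    (hnone : ∀ p : Int × Int, ¬ (InQ rows cols p ∧ Dmin w0 ws p = k)) :
    h = (List.range rows).map (fun r : Nat =>
      (List.range cols).map (fun c : Nat => Dmin w0 ws ((r : Int), (c : Int)))) := by
  have hShD : Shape rows cols ((List.range rows).map (fun r : Nat =>
      (List.range cols).map (fun c : Nat => Dmin w0 ws ((r : Int), (c : Int))))) := by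
    constructor
    · simp
    · intro row hm
      simp only [List.mem_map, List.mem_range] at hm
      obtain ⟨r, _, rfl⟩ := hm
      simp
  apply grid_ext rows cols h _ hSh hShD
  intro a b ha hb
  have hx : InQ rows cols ((a : Int), (b : Int)) := by
    refine ⟨?_, ?_, ?_, ?_⟩ <;> simp <;> omega
  have hDle : Dmin w0 ws ((a : Int), (b : Int)) ≤ k := by
    by_contra hcc
    push_neg at hcc
    have hnn := Dmin_nonneg w0 ws ((a : Int), (b : Int))
    obtain ⟨y, hyin, hyd⟩ := exists_level rows cols w0 ws hW
      (Dmin w0 ws ((a : Int), (b : Int))).toNat ((a : Int), (b : Int)) hx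
      (by omega) k hk (by omega)
    exact hnone y ⟨hyin, hyd⟩
  have hD : hget ((List.range rows).map (fun r : Nat =>
      (List.range cols).map (fun c : Nat => Dmin w0 ws ((r : Int), (c : Int))))) (a : Int) (b : Int)
      = Dmin w0 ws ((a : Int), (b : Int)) := by
    unfold hget
    simp only [Int.toNat_natCast]
    have h1 : ((List.range rows).map (fun r : Nat =>
        (List.range cols).map (fun c : Nat => Dmin w0 ws ((r : Int), (c : Int))))).getD a []
        = (List.range cols).map (fun c : Nat => Dmin w0 ws ((a : Int), (c : Int))) := by
      rw [List.getD_eq_getElem _ _ (by simpa using ha)]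
      simp
    rw [h1, List.getD_eq_getElem _ _ (by simpa using hb)]
    simp
  rw [hD, hpt _ hx, if_pos hDle]

-- ---- the level BFS computes the distance grid ----
theorem BFS_D (rows cols : Nat) (w0 : Int × Int) (ws : List (Int × Int))
    (hW : ∀ p ∈ w0 :: ws, InQ rows cols p) :
    ∀ (n : Nat) (h : List (List Int)) (f : List (Int × Int)) (k : Int),
    mc h = n → 0 ≤ k → InvG rows cols h →
    (∀ x : Int × Int, InQ rows cols x →
      hget h x.1 x.2 = if Dmin w0 ws x ≤ k then Dmin w0 ws x else -1) →
    (∀ p : Int × Int, p ∈ f ↔ InQ rows cols p ∧ Dmin w0 ws p = k) →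
    runB rows cols h f k = (List.range rows).map (fun r : Nat =>
      (List.range cols).map (fun c : Nat => Dmin w0 ws ((r : Int), (c : Int)))) := by
  intro n
  induction n using Nat.strong_induction_on with
  | _ n ih =>
    intro h f k hmc hk hInv hpt hfr
    cases f with
    | nil =>
      have hres : runB rows cols h [] k = h := by unfold runB; rw [goB_nil]
      rw [hres]
      exact done_grid rows cols w0 ws hW h k hk hInv.1 hpt
        (fun p hp => by have := (hfr p).mpr hp; simp at this)
    | cons p f' =>
      rw [osB rows cols h p f' k hInv hk]
      rcases hF : (p :: f').foldl (expandB rows cols (k + 1)) (h, []) with ⟨F1, F2⟩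
      obtain ⟨hI, hE, hLe, _, _, _⟩ := levelB rows cols k hk (p :: f') (h, []) hInv
      rw [hF] at hI hE hLe
      dsimp only at hI hE hLe
      simp only [List.length_nil, add_zero] at hE
      obtain ⟨hpt', hfr'⟩ := level_step rows cols w0 ws hW h (p :: f') k hk hInv.1 hpt hfr
      rw [hF] at hpt' hfr'
      dsimp only at hpt' hfr'
      cases F2 with
      | nil =>
        have hres : runB rows cols F1 [] (k + 1) = F1 := by unfold runB; rw [goB_nil]
        rw [hres]
        exact done_grid rows cols w0 ws hW F1 (k + 1) (by omega) hI.1 hpt'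
          (fun q hq => by have := (hfr' q).mpr hq; simp at this)
      | cons y ys =>
        refine ih (mc F1) ?_ F1 (y :: ys) (k + 1) rfl (by omega) hI hpt' hfr'
        simp only [List.length_cons] at hE
        omega

-- ---- final assembly ----
theorem mainEq (iw : List (List Int)) (rows cols : Nat) :
    runA rows cols (initA iw rows cols).1 (initA iw rows cols).2
      = runB rows cols
          ((List.range rows).map (fun r =>
            (List.range cols).map (fun c => if wat iw r c = 1 then 0 else -1)))
          ((List.range rows).flatMap (fun r =>
            (List.range cols).filterMap (fun c =>
              if wat iw r c = 1 then some ((r : Int), (c : Int)) else none))) 0 := by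
  obtain ⟨hSh, hQ, hPt⟩ := initA_char iw rows cols
  have hgrid : (initA iw rows cols).1 = (List.range rows).map (fun r =>
      (List.range cols).map (fun c => if wat iw r c = 1 then 0 else -1)) :=
    grid_ext rows cols _ _ hSh (h0_shape iw rows cols) (fun a b ha hb => by
      rw [hPt a b ha hb, h0_pt iw rows cols a b ha hb])
  have hlev : ∀ p ∈ (List.range rows).flatMap (fun r =>
      (List.range cols).filterMap (fun c =>
        if wat iw r c = 1 then some ((r : Int), (c : Int)) else none)),
      hget ((List.range rows).map (fun r =>
        (List.range cols).map (fun c => if wat iw r c = 1 then 0 else -1))) p.1 p.2 = 0 := by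
    intro p hp
    rw [mem_waterlist] at hp
    obtain ⟨a, b, ha, hb, rfl, hw⟩ := hp
    rw [h0_pt iw rows cols a b ha hb, if_pos hw]
  rw [hgrid, hQ]
  exact SIM rows cols _ _ _ 0 rfl (h0_invG iw rows cols)
    (fun p hp => waterlist_inQ iw rows cols p hp) hlev (le_refl 0)

theorem bfs_eq_alt (iw : List (List Int)) (rows cols : Nat) :
    runB rows cols
        ((List.range rows).map (fun r =>
          (List.range cols).map (fun c => if wat iw r c = 1 then 0 else -1)))
        ((List.range rows).flatMap (fun r =>
          (List.range cols).filterMap (fun c =>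
            if wat iw r c = 1 then some ((r : Int), (c : Int)) else none))) 0
      = match (List.range rows).flatMap (fun r =>
          (List.range cols).filterMap (fun c =>
            if wat iw r c = 1 then some ((r : Int), (c : Int)) else none)) with
        | [] => List.replicate rows (List.replicate cols (-1))
        | w0 :: ws =>
          (List.range rows).map (fun r : Nat => (List.range cols).map (fun c : Nat =>
            (ws.map (fun w => mdist ((r : Int), (c : Int)) w)).foldl min
              (mdist ((r : Int), (c : Int)) w0))) := by
  rcases hWl : (List.range rows).flatMap (fun r =>
      (List.range cols).filterMap (fun c =>
        if wat iw r c = 1 then some ((r : Int), (c : Int)) else none)) with _ | ⟨w0, ws⟩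
  · -- no water: BFS returns the untouched all -1 grid
    have h1 : runB rows cols
        ((List.range rows).map (fun r =>
          (List.range cols).map (fun c => if wat iw r c = 1 then 0 else -1)))
        [] 0
        = (List.range rows).map (fun r =>
          (List.range cols).map (fun c => if wat iw r c = 1 then 0 else -1)) := by
      unfold runB; rw [goB_nil]
    rw [h1]
    have hnow : ∀ a b : Nat, a < rows → b < cols → wat iw a b ≠ 1 := by
      intro a b ha hb hw
      have : ((a : Int), (b : Int)) ∈ (List.range rows).flatMap (fun r =>
          (List.range cols).filterMap (fun c =>
            if wat iw r c = 1 then some ((r : Int), (c : Int)) else none)) :=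
        (mem_waterlist iw rows cols _).mpr ⟨a, b, ha, hb, rfl, hw⟩
      rw [hWl] at this
      simp at this
    have hShR : Shape rows cols (List.replicate rows (List.replicate cols (-1 : Int))) := by
      constructor
      · simp
      · intro row hm
        rw [List.eq_of_mem_replicate hm]
        simp
    apply grid_ext rows cols _ _ (h0_shape iw rows cols) hShR
    intro a b ha hb
    rw [h0_pt iw rows cols a b ha hb, if_neg (hnow a b ha hb)]
    unfold hget
    simp only [Int.toNat_natCast]
    have h2 : (List.replicate rows (List.replicate cols (-1 : Int))).getD a []
        = List.replicate cols (-1) := by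
      rw [List.getD_eq_getElem _ _ (by simpa using ha)]
      simp
    rw [h2, List.getD_eq_getElem _ _ (by simpa using hb)]
    simp
  · -- water nonempty: BFS computes the Dmin grid
    have hW : ∀ p ∈ w0 :: ws, InQ rows cols p := by
      intro p hp
      apply waterlist_inQ iw rows cols
      rw [hWl]
      exact hp
    have hwmem : ∀ p : Int × Int, p ∈ w0 :: ws ↔
        ∃ a b : Nat, a < rows ∧ b < cols ∧ p = ((a : Int), (b : Int)) ∧ wat iw a b = 1 := by
      intro p
      rw [← hWl]
      exact mem_waterlist iw rows cols p
    have hpt : ∀ x : Int × Int, InQ rows cols x →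
        hget ((List.range rows).map (fun r =>
          (List.range cols).map (fun c => if wat iw r c = 1 then 0 else -1))) x.1 x.2
          = if Dmin w0 ws x ≤ 0 then Dmin w0 ws x else -1 := by
      intro x hx
      obtain ⟨a, b, ha, hb, rfl⟩ := inQ_cast rows cols x hx
      rw [h0_pt iw rows cols a b ha hb]
      have hz := Dmin_zero_iff w0 ws ((a : Int), (b : Int))
      have hnn := Dmin_nonneg w0 ws ((a : Int), (b : Int))
      by_cases hw : wat iw a b = 1
      · have hmem : ((a : Int), (b : Int)) ∈ w0 :: ws :=
          (hwmem _).mpr ⟨a, b, ha, hb, rfl, hw⟩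
        have hD0 : Dmin w0 ws ((a : Int), (b : Int)) = 0 := hz.mpr hmem
        rw [if_pos hw, if_pos (by omega), hD0]
      · have hDne : Dmin w0 ws ((a : Int), (b : Int)) ≠ 0 := by
          intro hcc
          obtain ⟨a', b', _, _, heq, hw'⟩ := (hwmem _).mp (hz.mp hcc)
          have : a = a' ∧ b = b' := by
            cases heq
            constructor <;> omega
          obtain ⟨rfl, rfl⟩ := this
          exact hw hw'
        rw [if_neg hw, if_neg (by omega)]
    have hfr : ∀ p : Int × Int, p ∈ w0 :: ws ↔ InQ rows cols p ∧ Dmin w0 ws p = 0 := by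
      intro p
      constructor
      · intro hp
        exact ⟨hW p hp, (Dmin_zero_iff w0 ws p).mpr hp⟩
      · rintro ⟨_, hd⟩
        exact (Dmin_zero_iff w0 ws p).mp hd
    have := BFS_D rows cols w0 ws hW
      (mc ((List.range rows).map (fun r =>
        (List.range cols).map (fun c => if wat iw r c = 1 then 0 else -1))))
      ((List.range rows).map (fun r =>
        (List.range cols).map (fun c => if wat iw r c = 1 then 0 else -1)))
      (w0 :: ws) 0 rfl (le_refl 0) (h0_invG iw rows cols) hpt hfr
    rw [this]
    simp only [Dmin]

-- ===== VERDICT (by name: the statement is the Claim_ definition above) =====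
theorem highestPeak_spec : Claim_equal_highestPeak := by
  unfold Claim_equal_highestPeak
  intro iw _ _
  unfold Spec_highestPeak
  cases iw with
  | nil => rfl
  | cons row0 rest =>
    show runA (row0 :: rest).length row0.length
        (initA (row0 :: rest) (row0 :: rest).length row0.length).1
        (initA (row0 :: rest) (row0 :: rest).length row0.length).2
      = highestPeak_alt (row0 :: rest)
    rw [mainEq (row0 :: rest) (row0 :: rest).length row0.length,
      bfs_eq_alt (row0 :: rest) (row0 :: rest).length row0.length]
    rfl
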